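-- pv_equiv track=rewrite | github.com/k-harada/AtCoder | other_contests/PAST202004/I.py | solve
-- ===== SOURCE A (Python) =====
-- def solve(n, a_list):
--     res_list = [0] * (2 ** n)
--     a_list_s = [[] for i in range(n)]
--     for i in range(2 ** n):
--         a_list_s[0].append(i)
--     for i in range(1, n):
--         for j in range(2 ** (n - i)):
--             if a_list[a_list_s[i - 1][2 * j]] > a_list[a_list_s[i - 1][2 * j + 1]]:
--                 a_list_s[i].append(a_list_s[i - 1][2 * j])
--                 res_list[a_list_s[i - 1][2 * j + 1]] = i
--             else:
--                 a_list_s[i].append(a_list_s[i - 1][2 * j + 1])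
--                 res_list[a_list_s[i - 1][2 * j]] = i
--     for a in a_list_s[-1]:
--         res_list[a] = n
--     return res_list
-- ===== SOURCE B (Python) =====
-- def solve(n, a_list):
--     res_list = [0] * (2 ** n)
--
--     def winner(start, length):
--         # champion of the contiguous bracket a_list[start:start+length]
--         if length == 1:
--             return start
--         half = length // 2
--         w1 = winner(start, half)
--         w2 = winner(start + half, half)
--         rnd = length.bit_length() - 1
--         if a_list[w1] > a_list[w2]:
--             res_list[w2] = rnd
--             return w1
--         else:
--             res_list[w1] = rnd
--             return w2
--
--     half = 2 ** (n - 1)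
--     f1 = winner(0, half)
--     f2 = winner(half, half)
--     res_list[f1] = n
--     res_list[f2] = n
--     return res_list
-- ===== Notes on version B (the rewrite author's own statement) =====
-- stated objective: alternative
-- what changed: A simulates the tournament breadth-first, building a table of survivor lists round by round with an inner index loop per round; B replaces the whole table by a recursive divide-and-conquer winner(start, length) over the contiguous bracket that recurses on the two halves and records each loser's round on the way up (same cost, different traversal order).
import Mathlib
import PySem

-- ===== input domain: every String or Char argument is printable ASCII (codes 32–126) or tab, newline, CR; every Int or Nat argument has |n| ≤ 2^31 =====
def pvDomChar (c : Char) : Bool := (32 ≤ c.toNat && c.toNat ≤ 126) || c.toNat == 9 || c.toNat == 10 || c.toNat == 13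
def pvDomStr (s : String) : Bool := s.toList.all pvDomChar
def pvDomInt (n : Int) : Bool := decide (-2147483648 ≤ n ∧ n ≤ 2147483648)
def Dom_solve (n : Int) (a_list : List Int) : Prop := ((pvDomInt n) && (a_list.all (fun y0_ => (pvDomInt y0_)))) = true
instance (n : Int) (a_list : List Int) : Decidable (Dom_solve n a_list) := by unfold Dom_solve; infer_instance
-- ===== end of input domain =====

-- B replaces A's breadth-first layer table (a list of survivor lists, one round at a time)
-- by a recursive divide-and-conquer over the bracket; same results (objective: alternative).

-- ===== PORT A =====
-- xs[e] is ported with the total forms pyGetD/pySetD; Pre_solve excludes exactly the inputs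
-- where the Python raises, so every access below is in range there.
def solveInner (a_list : List Int) (i : Int)
    (st : List (List Int) × List Int) (j : Int) : List (List Int) × List Int :=
  let prev := PySem.List.pyGetD st.1 (i - 1) []
  let x := PySem.List.pyGetD prev (2 * j) 0
  let y := PySem.List.pyGetD prev (2 * j + 1) 0
  if PySem.List.pyGetD a_list x 0 > PySem.List.pyGetD a_list y 0 then
    (PySem.List.pySetD st.1 i (PySem.List.pyGetD st.1 i [] ++ [x]),
     PySem.List.pySetD st.2 y i)
  else
    (PySem.List.pySetD st.1 i (PySem.List.pyGetD st.1 i [] ++ [y]),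
     PySem.List.pySetD st.2 x i)

def solveRound (n : Int) (a_list : List Int)
    (st : List (List Int) × List Int) (i : Int) : List (List Int) × List Int :=
  (PySem.List.pyRange 0 ((2:Int) ^ (n - i).toNat) 1).foldl (solveInner a_list i) st

def solve (n : Int) (a_list : List Int) : List Int :=
  let res_list : List Int := List.replicate (2 ^ n.toNat) 0
  let layers0 : List (List Int) := (List.range n.toNat).map (fun _ => ([] : List Int))
  -- for i in range(2 ** n): a_list_s[0].append(i)
  let layers1 := (PySem.List.pyRange 0 ((2:Int) ^ n.toNat) 1).foldl
    (fun ls i => PySem.List.pySetD ls 0 (PySem.List.pyGetD ls 0 [] ++ [i])) layers0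
  -- for i in range(1, n): for j in range(2 ** (n - i)): ...
  let st := (PySem.List.pyRange 1 n 1).foldl (solveRound n a_list) (layers1, res_list)
  -- for a in a_list_s[-1]: res_list[a] = n
  (PySem.List.pyGetD st.1 (-1) []).foldl (fun r a => PySem.List.pySetD r a n) st.2

-- ===== PORT B =====
-- winner(start, length): champion of the contiguous bracket of that size, recording each
-- loser's round; 'length == 1' is ported as 'length ≤ 1' (winner is only ever called with a
-- power-of-two length ≥ 1, the ≤ makes termination evident); res_list is threaded explicitly.
def winnerB (a_list : List Int) (start length : Nat) (res_list : List Int) : Nat × List Int :=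
  if length ≤ 1 then (start, res_list)
  else
    let half := length / 2
    let (w1, res1) := winnerB a_list start half res_list
    let (w2, res2) := winnerB a_list (start + half) half res1
    let rnd : Int := (PySem.Int.bitLength (length : Int) : Int) - 1
    if PySem.List.pyGetD a_list (w1 : Int) 0 > PySem.List.pyGetD a_list (w2 : Int) 0 then
      (w1, PySem.List.pySetD res2 (w2 : Int) rnd)
    else
      (w2, PySem.List.pySetD res2 (w1 : Int) rnd)
termination_by length
decreasing_by all_goals omega

def solve_alt (n : Int) (a_list : List Int) : List Int :=
  let res_list : List Int := List.replicate (2 ^ n.toNat) 0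
  let half : Nat := 2 ^ (n.toNat - 1)
  let (f1, res1) := winnerB a_list 0 half res_list
  let (f2, res2) := winnerB a_list half half res1
  PySem.List.pySetD (PySem.List.pySetD res2 (f1 : Int) n) (f2 : Int) n

-- ===== PRECONDITION & SPEC =====
-- Pre_solve excludes exactly the inputs on which the Python A raises: n ≤ 0 (IndexError on
-- a_list_s[-1], resp. TypeError on 2 ** n for n < 0), and n ≥ 2 with a_list shorter than 2^n
-- (IndexError on a_list[...] in the first round); for n = 1 no a_list element is read.
def Pre_solve (n : Int) (a_list : List Int) : Prop :=
  1 ≤ n ∧ (n = 1 ∨ 2 ^ n.toNat ≤ a_list.length)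
instance (n : Int) (a_list : List Int) : Decidable (Pre_solve n a_list) := by
  unfold Pre_solve; infer_instance

def pvWitness_solve : Int × List Int := (2, [3, 1, 2, 4])

def Spec_solve (n : Int) (a_list : List Int) (out : List Int) : Prop := out = solve_alt n a_list
instance (n : Int) (a_list : List Int) (out : List Int) : Decidable (Spec_solve n a_list out) := by
  unfold Spec_solve; infer_instance

-- ===== CLAIM (what is proved, stated in full; the proofs are below) =====
def Claim_equal_solve : Prop := ∀ (n : Int) (a_list : List Int),
  Dom_solve n a_list → Pre_solve n a_list → Spec_solve n a_list (solve n a_list)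

-- ===== LEMMAS AND PROOFS =====

def pvVal (a : List Int) (x : Int) : Int := PySem.List.pyGetD a x 0
def pvWins (a : List Int) (x y : Int) : Int := if pvVal a x > pvVal a y then x else y
def pvLosr (a : List Int) (x y : Int) : Int := if pvVal a x > pvVal a y then y else x
def pvWinners (a : List Int) : List Int → List Int
  | x :: y :: t => pvWins a x y :: pvWinners a t
  | _ => []
def pvLosers (a : List Int) : List Int → List Int
  | x :: y :: t => pvLosr a x y :: pvLosers a t
  | _ => []
def pvIter (a : List Int) : Nat → List Int → List Int
  | 0, s => s
  | k+1, s => pvIter a k (pvWinners a s)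
def pvTag (r : Int) (l : List Int) : List (Int × Int) := l.map (fun x => (x, r))
def pvIW (a : List Int) : Int → Nat → List Int → List (Int × Int)
  | _, 0, _ => []
  | r, k+1, s => pvTag r (pvLosers a s) ++ pvIW a (r+1) k (pvWinners a s)
def pvDC (a : List Int) : Nat → List Int → Int
  | 0, s => s.headD 0
  | k+1, s => pvWins a (pvDC a k (s.take (2^k))) (pvDC a k (s.drop (2^k)))
def pvDW (a : List Int) : Int → Nat → List Int → List (Int × Int)
  | _, 0, _ => []
  | r, k+1, s => pvDW a r k (s.take (2^k)) ++ pvDW a r k (s.drop (2^k))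
      ++ [(pvLosr a (pvDC a k (s.take (2^k))) (pvDC a k (s.drop (2^k))), r + k)]
def pvApp (res : List Int) (ws : List (Int × Int)) : List Int :=
  ws.foldl (fun r p => PySem.List.pySetD r p.1 p.2) res

theorem length_pvWinners (a : List Int) (s : List Int) :
    (pvWinners a s).length = s.length / 2 := by
  fun_induction pvWinners a s with
  | case1 x y t ih => simp [ih]; omega
  | case2 s hs =>
    match s, hs with
    | [], _ => simp
    | [x], _ => simp
    | x :: y :: t, hs => exact absurd rfl (hs x y t)

theorem pvWinners_append (a : List Int) (s1 s2 : List Int) (h : s1.length % 2 = 0) :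
    pvWinners a (s1 ++ s2) = pvWinners a s1 ++ pvWinners a s2 := by
  fun_induction pvWinners a s1 with
  | case1 x y t ih => simp at h; simp [pvWinners, ih (by omega)]
  | case2 s hs =>
    match s, hs with
    | [], _ => simp
    | [x], _ => simp at h
    | x :: y :: t, hs => exact absurd rfl (hs x y t)

theorem pvLosers_append (a : List Int) (s1 s2 : List Int) (h : s1.length % 2 = 0) :
    pvLosers a (s1 ++ s2) = pvLosers a s1 ++ pvLosers a s2 := by
  fun_induction pvLosers a s1 with
  | case1 x y t ih => simp at h; simp [pvLosers, ih (by omega)]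
  | case2 s hs =>
    match s, hs with
    | [], _ => simp
    | [x], _ => simp at h
    | x :: y :: t, hs => exact absurd rfl (hs x y t)

theorem pvLosers_winners_perm (a : List Int) (s : List Int) (h : s.length % 2 = 0) :
    (pvLosers a s ++ pvWinners a s).Perm s := by
  fun_induction pvLosers a s with
  | case1 x y t ih =>
    simp at h
    have ih' := ih (by omega)
    have h1 : (pvLosr a x y :: pvLosers a t) ++ (pvWins a x y :: pvWinners a t)
        = pvLosr a x y :: (pvLosers a t ++ pvWins a x y :: pvWinners a t) := by simp
    rw [pvWinners, h1]
    refine List.Perm.trans (List.Perm.cons _ List.perm_middle) ?_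
    refine List.Perm.trans (List.Perm.cons _ (List.Perm.cons _ ih')) ?_
    unfold pvLosr pvWins
    by_cases hc : pvVal a x > pvVal a y
    · simp only [hc, if_pos]; exact List.Perm.swap x y t
    · simp only [hc, if_neg, not_false_iff]; rfl
  | case2 s hs =>
    match s, hs with
    | [], _ => simp [pvWinners]
    | [x], _ => simp at h
    | x :: y :: t, hs => exact absurd rfl (hs x y t)

theorem pvIter_comm (a : List Int) (k : Nat) (s : List Int) :
    pvIter a (k+1) s = pvWinners a (pvIter a k s) := by
  induction k generalizing s with
  | zero => simp [pvIter]
  | succ m ih => rw [show pvIter a (m+1+1) s = pvIter a (m+1) (pvWinners a s) from rfl, ih]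
                 rfl

theorem length_pvIter (a : List Int) (k : Nat) (s : List Int) :
    (pvIter a k s).length = s.length / 2 ^ k := by
  induction k generalizing s with
  | zero => simp [pvIter]
  | succ m ih =>
    rw [show pvIter a (m+1) s = pvIter a m (pvWinners a s) from rfl, ih, length_pvWinners,
      Nat.div_div_eq_div_mul, pow_succ, mul_comm]

theorem pvIter_append (a : List Int) (k : Nat) (s1 s2 : List Int)
    (h1 : s1.length = 2 ^ k) (h2 : s2.length = 2 ^ k) :
    pvIter a k (s1 ++ s2) = pvIter a k s1 ++ pvIter a k s2 := by
  induction k generalizing s1 s2 with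
  | zero => simp [pvIter]
  | succ m ih =>
    have he : s1.length % 2 = 0 := by rw [h1, pow_succ]; omega
    rw [show pvIter a (m+1) (s1++s2) = pvIter a m (pvWinners a (s1++s2)) from rfl,
      pvWinners_append a s1 s2 he,
      ih _ _ (by rw [length_pvWinners, h1, pow_succ]; omega)
            (by rw [length_pvWinners, h2, pow_succ]; omega)]
    rfl

theorem pvIter_singleton (a : List Int) (k : Nat) (s : List Int) (h : s.length = 2 ^ k) :
    pvIter a k s = [pvDC a k s] := by
  induction k generalizing s with
  | zero =>
    obtain ⟨x, rfl⟩ := List.length_eq_one_iff.mp h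
    simp [pvIter, pvDC]
  | succ m ih =>
    have hts : s.take (2^m) ++ s.drop (2^m) = s := List.take_append_drop _ s
    have hlt : (s.take (2^m)).length = 2 ^ m := by
      rw [List.length_take, h, pow_succ]; omega
    have hld : (s.drop (2^m)).length = 2 ^ m := by
      rw [List.length_drop, h, pow_succ]; omega
    rw [pvIter_comm, show pvIter a m s = pvIter a m (s.take (2^m) ++ s.drop (2^m)) by rw [hts],
      pvIter_append a m _ _ hlt hld, ih _ hlt, ih _ hld]
    simp [pvWinners, pvDC]

theorem pvIW_comm (a : List Int) (k : Nat) (r : Int) (s : List Int) :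
    pvIW a r (k+1) s = pvIW a r k s ++ pvTag (r + k) (pvLosers a (pvIter a k s)) := by
  induction k generalizing r s with
  | zero => simp [pvIW, pvIter]
  | succ m ih =>
    rw [show pvIW a r (m+1+1) s
        = pvTag r (pvLosers a s) ++ pvIW a (r+1) (m+1) (pvWinners a s) from rfl, ih]
    rw [show pvIW a r (m+1) s
        = pvTag r (pvLosers a s) ++ pvIW a (r+1) m (pvWinners a s) from rfl]
    rw [show pvIter a (m+1) s = pvIter a m (pvWinners a s) from rfl]
    rw [List.append_assoc, show r + 1 + (m:Int) = r + ((m+1 : Nat) : Int) by push_cast; ring]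

theorem pvIW_append (a : List Int) (k : Nat) (r : Int) (s1 s2 : List Int)
    (h1 : s1.length = 2 ^ k) (h2 : s2.length = 2 ^ k) :
    (pvIW a r k (s1 ++ s2)).Perm (pvIW a r k s1 ++ pvIW a r k s2) := by
  induction k generalizing r s1 s2 with
  | zero => simp [pvIW]
  | succ m ih =>
    have he1 : s1.length % 2 = 0 := by rw [h1, pow_succ]; omega
    have ihw := ih (r+1) (pvWinners a s1) (pvWinners a s2)
      (by rw [length_pvWinners, h1, pow_succ]; omega)
      (by rw [length_pvWinners, h2, pow_succ]; omega)
    rw [show pvIW a r (m+1) (s1++s2)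
        = pvTag r (pvLosers a (s1++s2)) ++ pvIW a (r+1) m (pvWinners a (s1++s2)) from rfl,
      pvLosers_append a s1 s2 he1, pvWinners_append a s1 s2 he1]
    rw [show pvIW a r (m+1) s1
        = pvTag r (pvLosers a s1) ++ pvIW a (r+1) m (pvWinners a s1) from rfl]
    rw [show pvIW a r (m+1) s2
        = pvTag r (pvLosers a s2) ++ pvIW a (r+1) m (pvWinners a s2) from rfl]
    rw [← Multiset.coe_eq_coe] at ihw ⊢
    simp only [← Multiset.coe_add, pvTag, List.map_append] at ihw ⊢
    rw [ihw]
    abel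

theorem pvIW_perm_pvDW (a : List Int) (k : Nat) (r : Int) (s : List Int)
    (h : s.length = 2 ^ k) :
    (pvIW a r k s).Perm (pvDW a r k s) := by
  induction k generalizing r s with
  | zero => simp [pvIW, pvDW]
  | succ m ih =>
    have hts : s.take (2^m) ++ s.drop (2^m) = s := List.take_append_drop _ s
    have hlt : (s.take (2^m)).length = 2 ^ m := by rw [List.length_take, h, pow_succ]; omega
    have hld : (s.drop (2^m)).length = 2 ^ m := by rw [List.length_drop, h, pow_succ]; omega
    have iht := ih r _ hlt
    have ihd := ih r _ hld
    rw [pvIW_comm, show pvDW a r (m+1) s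
        = pvDW a r m (s.take (2^m)) ++ pvDW a r m (s.drop (2^m))
          ++ [(pvLosr a (pvDC a m (s.take (2^m))) (pvDC a m (s.drop (2^m))), r + m)] from rfl]
    have hiter : pvIter a m s = [pvDC a m (s.take (2^m))] ++ [pvDC a m (s.drop (2^m))] := by
      conv_lhs => rw [← hts]
      rw [pvIter_append a m _ _ hlt hld, pvIter_singleton a m _ hlt, pvIter_singleton a m _ hld]
    have hsplit : (pvIW a r m s).Perm (pvIW a r m (s.take (2^m)) ++ pvIW a r m (s.drop (2^m))) := by
      conv_lhs => rw [← hts]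
      exact pvIW_append a m r _ _ hlt hld
    rw [← Multiset.coe_eq_coe] at iht ihd hsplit ⊢
    simp only [← Multiset.coe_add] at iht ihd hsplit ⊢
    rw [hiter, hsplit, iht, ihd]
    simp [pvLosers, pvTag]

theorem pvIW_keys (a : List Int) (k : Nat) (r : Int) (s : List Int) (h : s.length = 2 ^ k) :
    (pvIter a k s ++ (pvIW a r k s).map Prod.fst).Perm s := by
  induction k generalizing r s with
  | zero => simp [pvIter, pvIW]
  | succ m ih =>
    have he : s.length % 2 = 0 := by rw [h, pow_succ]; omega
    have ihw := ih (r+1) (pvWinners a s) (by rw [length_pvWinners, h, pow_succ]; omega)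
    have hlw := pvLosers_winners_perm a s he
    rw [show pvIter a (m+1) s = pvIter a m (pvWinners a s) from rfl,
      show pvIW a r (m+1) s = pvTag r (pvLosers a s) ++ pvIW a (r+1) m (pvWinners a s) from rfl]
    rw [← Multiset.coe_eq_coe] at ihw hlw ⊢
    simp only [List.map_append, ← Multiset.coe_add, pvTag, List.map_map] at ihw hlw ⊢
    rw [show (Prod.fst ∘ fun x => (x, r)) = id from rfl]
    simp only [List.map_id]
    rw [← hlw, ← ihw]
    abel

theorem pvSetD_comm (r : List Int) (i j v w : Int) (hne : i ≠ j) (hi : 0 ≤ i) (hj : 0 ≤ j) :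
    PySem.List.pySetD (PySem.List.pySetD r i v) j w
      = PySem.List.pySetD (PySem.List.pySetD r j w) i v := by
  rw [PySem.List.pySetD_of_nonneg _ _ hi, PySem.List.pySetD_of_nonneg _ _ hj,
    PySem.List.pySetD_of_nonneg _ _ hj, PySem.List.pySetD_of_nonneg _ _ hi]
  exact (List.set_comm _ _ (by omega)).symm

theorem pvApp_perm (w1 w2 : List (Int × Int)) (h : w1.Perm w2)
    (hnd : (w1.map Prod.fst).Nodup) (hpos : ∀ p ∈ w1, 0 ≤ p.1) (res : List Int) :
    pvApp res w1 = pvApp res w2 := by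
  induction h generalizing res with
  | nil => rfl
  | cons x l ih =>
    simp only [pvApp, List.foldl_cons]
    exact ih (by simp only [List.map_cons, List.nodup_cons] at hnd; exact hnd.2)
      (fun p hp => hpos p (List.mem_cons_of_mem x hp)) _
  | swap x y l =>
    have hne : y.1 ≠ x.1 := by
      simp only [List.map_cons, List.nodup_cons, List.mem_cons] at hnd
      exact fun hxy => hnd.1 (Or.inl hxy)
    simp only [pvApp, List.foldl_cons]
    rw [pvSetD_comm _ _ _ _ _ hne (hpos y (by simp)) (hpos x (by simp))]
  | trans h1 h2 ih1 ih2 =>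
    rw [ih1 hnd hpos res]
    exact ih2 ((h1.map Prod.fst).nodup_iff.mp hnd)
      (fun p hp => hpos p (h1.mem_iff.mpr hp)) res

-- ===== A-side plumbing =====

theorem pvApp_append (res : List Int) (w1 w2 : List (Int × Int)) :
    pvApp res (w1 ++ w2) = pvApp (pvApp res w1) w2 := List.foldl_append

theorem pvSet_map_range {β : Type} (f : Nat → β) (nn i : Nat) (v : β) (_hi : i < nn) :
    ((List.range nn).map f).set i v
      = (List.range nn).map (fun j => if j = i then v else f j) := by
  apply List.ext_getElem (by simp)
  intro j hj1 hj2
  simp only [List.getElem_set, List.getElem_map, List.getElem_range]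
  by_cases hji : i = j
  · simp [hji]
  · have hij : ¬ j = i := fun hh => hji hh.symm
    simp [hji, hij]

-- the initial-layer loop: appending each element of l to layer 0
theorem pvAppendLoop (l : List Int) (ls : List (List Int)) (h : 0 < ls.length) :
    l.foldl (fun ls i => PySem.List.pySetD ls 0 (PySem.List.pyGetD ls 0 [] ++ [i])) ls
      = PySem.List.pySetD ls 0 (PySem.List.pyGetD ls 0 [] ++ l) := by
  induction l generalizing ls with
  | nil =>
    rw [List.foldl_nil, List.append_nil, PySem.List.pyGetD_zero,
      show (0:Int) = ((0:Nat):Int) from rfl, PySem.List.pySetD_natCast,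
      List.getD_eq_getElem _ _ h, List.set_getElem_self h]
  | cons x t ih =>
    rw [List.foldl_cons, ih _ (by simp [PySem.List.pySetD_of_nonneg _ _ le_rfl, h])]
    simp only [show (0:Int) = ((0:Nat):Int) from rfl, PySem.List.pySetD_natCast,
      PySem.List.pyGetD_natCast]
    have hset : 0 < ((ls.set 0 (List.getD ls 0 [] ++ [x]))).length := by simpa using h
    rw [List.getD_eq_getElem _ _ hset, List.getElem_set_self hset,
      List.set_set, List.getD_eq_getElem _ _ h]
    simp

-- A's inner loop over j plays the first 2*m players of layer iN-1 pairwise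
theorem pvInnerLoop (a : List Int) (iN : Nat) (hi : 1 ≤ iN) (p : List Int)
    (m : Nat) (hm : 2 * m ≤ p.length) :
    ∀ (ls : List (List Int)) (r : List Int), iN < ls.length →
      PySem.List.pyGetD ls ((iN:Int) - 1) [] = p →
      (PySem.List.pyRange 0 (m:Int) 1).foldl (solveInner a (iN:Int)) (ls, r)
        = (PySem.List.pySetD ls (iN:Int)
            (PySem.List.pyGetD ls (iN:Int) [] ++ pvWinners a (p.take (2*m))),
           pvApp r (pvTag (iN:Int) (pvLosers a (p.take (2*m))))) := by
  induction m with
  | zero =>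
    intro ls r hlen hprev
    rw [show ((0:Nat):Int) = 0 from rfl, PySem.List.pyRange_one_eq_nil le_rfl, List.foldl_nil]
    rw [List.take_zero]
    simp only [pvWinners, pvLosers, pvTag, pvApp, List.map_nil, List.foldl_nil,
      List.append_nil, PySem.List.pySetD_natCast, PySem.List.pyGetD_natCast]
    rw [List.getD_eq_getElem _ _ hlen, List.set_getElem_self hlen]
  | succ m ihm =>
    intro ls r hlen hprev
    have hm' : 2*m ≤ p.length := by omega
    have h2m : 2*m < p.length := by omega
    have h2m1 : 2*m+1 < p.length := by omega
    rw [show ((m+1:Nat):Int) = (m:Int)+1 by push_cast; ring,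
      PySem.List.pyRange_one_succ_right (by positivity), List.foldl_append,
      List.foldl_cons, List.foldl_nil]
    rw [ihm hm' ls r hlen hprev]
    have htake : p.take (2*(m+1)) = p.take (2*m) ++ [p[2*m], p[2*m+1]] := by
      have ht1 := List.take_add_one (l := p) (i := 2*m+1)
      have ht2 := List.take_add_one (l := p) (i := 2*m)
      rw [List.getElem?_eq_getElem h2m1] at ht1
      rw [List.getElem?_eq_getElem h2m] at ht2
      rw [show 2*(m+1) = (2*m+1)+1 by ring, ht1, ht2]
      simp only [Option.toList_some, List.append_assoc, List.cons_append, List.nil_append]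
    have heven : (p.take (2*m)).length % 2 = 0 := by
      simp only [List.length_take]; omega
    have hwin : pvWinners a (p.take (2*(m+1)))
        = pvWinners a (p.take (2*m)) ++ [pvWins a p[2*m] p[2*m+1]] := by
      rw [htake, pvWinners_append _ _ _ heven]; rfl
    have hlos : pvLosers a (p.take (2*(m+1)))
        = pvLosers a (p.take (2*m)) ++ [pvLosr a p[2*m] p[2*m+1]] := by
      rw [htake, pvLosers_append _ _ _ heven]; rfl
    rw [hwin, hlos]
    simp only [solveInner]
    have hprev1 : PySem.List.pyGetD
        (PySem.List.pySetD ls (iN:Int)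
          (PySem.List.pyGetD ls (iN:Int) [] ++ pvWinners a (p.take (2*m)))) ((iN:Int)-1) []
        = p := by
      rw [show ((iN:Int) - 1) = ((iN - 1 : Nat) : Int) by omega,
        PySem.List.pyGetD_pySetD_natCast _ _ _ _ _ hlen, if_neg (by omega),
        show (((iN-1:Nat)):Int) = (iN:Int)-1 by omega]
      exact hprev
    rw [hprev1]
    have hx : PySem.List.pyGetD p (2*(m:Int)) 0 = p[2*m] := by
      rw [show (2*(m:Int)) = ((2*m:Nat):Int) by push_cast; ring, PySem.List.pyGetD_natCast,
        List.getD_eq_getElem _ _ h2m]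
    have hy : PySem.List.pyGetD p (2*(m:Int)+1) 0 = p[2*m+1] := by
      rw [show (2*(m:Int)+1) = ((2*m+1:Nat):Int) by push_cast; ring, PySem.List.pyGetD_natCast,
        List.getD_eq_getElem _ _ h2m1]
    rw [hx, hy]
    have hgetS1 : PySem.List.pyGetD
        (PySem.List.pySetD ls (iN:Int)
          (PySem.List.pyGetD ls (iN:Int) [] ++ pvWinners a (p.take (2*m)))) (iN:Int) []
        = PySem.List.pyGetD ls (iN:Int) [] ++ pvWinners a (p.take (2*m)) := by
      rw [PySem.List.pyGetD_pySetD_natCast _ _ _ _ _ hlen, if_pos rfl]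
    have hsetS1 : ∀ w : List Int, PySem.List.pySetD
        (PySem.List.pySetD ls (iN:Int)
          (PySem.List.pyGetD ls (iN:Int) [] ++ pvWinners a (p.take (2*m)))) (iN:Int) w
        = PySem.List.pySetD ls (iN:Int) w := by
      intro w
      simp only [PySem.List.pySetD_natCast, List.set_set]
    have happR : ∀ (ll : Int), PySem.List.pySetD
          (pvApp r (pvTag (iN:Int) (pvLosers a (p.take (2*m))))) ll (iN:Int)
        = pvApp r (pvTag (iN:Int) (pvLosers a (p.take (2*m)) ++ [ll])) := by
      intro ll
      simp only [pvTag, List.map_append, List.map_cons, List.map_nil, pvApp_append]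
      rfl
    by_cases hc : PySem.List.pyGetD a p[2*m] 0 > PySem.List.pyGetD a p[2*m+1] 0
    · rw [if_pos hc, hgetS1, hsetS1, happR]
      rw [show pvWins a p[2*m] p[2*m+1] = p[2*m] by rw [pvWins]; exact if_pos hc,
        show pvLosr a p[2*m] p[2*m+1] = p[2*m+1] by rw [pvLosr]; exact if_pos hc]
      rw [List.append_assoc]
    · rw [if_neg hc, hgetS1, hsetS1, happR]
      rw [show pvWins a p[2*m] p[2*m+1] = p[2*m+1] by rw [pvWins]; exact if_neg hc,
        show pvLosr a p[2*m] p[2*m+1] = p[2*m] by rw [pvLosr]; exact if_neg hc]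
      rw [List.append_assoc]

-- the first player list and the layer table after t outer rounds
def pvS0 (n' : Nat) : List Int := PySem.List.pyRange 0 ((2:Int) ^ n') 1
def pvLt (a : List Int) (n' t : Nat) : List (List Int) :=
  (List.range n').map (fun j => if j ≤ t then pvIter a j (pvS0 n') else [])

theorem length_pvS0 (n' : Nat) : (pvS0 n').length = 2 ^ n' := by
  rw [pvS0, PySem.List.length_pyRange_one]
  rw [show ((2:Int) ^ n' - 0) = (((2 ^ n' : Nat)):Int) by push_cast; ring]
  exact Int.toNat_natCast _

theorem pvOuterLoop (a : List Int) (n' : Nat) (res : List Int) (t : Nat) (ht : t ≤ n' - 1)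
    (hn : 1 ≤ n') :
    (PySem.List.pyRange 1 (1 + (t:Int)) 1).foldl (solveRound (n':Int) a) (pvLt a n' 0, res)
      = (pvLt a n' t, pvApp res (pvIW a 1 t (pvS0 n'))) := by
  induction t with
  | zero =>
    rw [show (1 + ((0:Nat):Int)) = 1 by ring, PySem.List.pyRange_one_eq_nil le_rfl,
      List.foldl_nil]
    rfl
  | succ t iht =>
    have ht' : t ≤ n' - 1 := by omega
    have htn : t + 1 < n' := by omega
    rw [show (1 + ((t+1:Nat):Int)) = (1 + (t:Int)) + 1 by push_cast; ring,
      PySem.List.pyRange_one_succ_right (by omega), List.foldl_append,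
      List.foldl_cons, List.foldl_nil, iht ht']
    rw [solveRound]
    have hcast : (2:Int) ^ (((n':Int) - (1 + (t:Int))).toNat)
        = (((2 ^ (n'-1-t) : Nat)):Int) := by
      rw [show ((n':Int) - (1 + (t:Int))).toNat = n'-1-t by omega]
      push_cast
      ring
    rw [hcast, show (1 + (t:Int)) = (((t+1:Nat)):Int) by push_cast; ring]
    have hplen : (pvIter a t (pvS0 n')).length = 2 ^ (n'-t) := by
      rw [length_pvIter, length_pvS0, Nat.pow_div (by omega) (by omega)]
    have hm : 2 * 2 ^ (n'-1-t) ≤ (pvIter a t (pvS0 n')).length := by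
      rw [hplen, ← pow_succ']
      apply Nat.pow_le_pow_right (by omega)
      omega
    have hlen : t + 1 < (pvLt a n' t).length := by
      rw [pvLt, List.length_map, List.length_range]
      exact htn
    have hprev : PySem.List.pyGetD (pvLt a n' t) (((t+1:Nat):Int) - 1) []
        = pvIter a t (pvS0 n') := by
      rw [show (((t+1:Nat):Int) - 1) = ((t:Nat):Int) by push_cast; ring,
        PySem.List.pyGetD_natCast, pvLt, PySem.List.getD_map_range _ _ _ _ (by omega),
        if_pos le_rfl]
    rw [pvInnerLoop a (t+1) (by omega) (pvIter a t (pvS0 n')) (2 ^ (n'-1-t)) hm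
      (pvLt a n' t) _ hlen hprev]
    have htk : (pvIter a t (pvS0 n')).take (2 * 2 ^ (n'-1-t)) = pvIter a t (pvS0 n') := by
      apply List.take_of_length_le
      rw [hplen, ← pow_succ']
      apply Nat.pow_le_pow_right (by omega)
      omega
    rw [htk]
    have hget : PySem.List.pyGetD (pvLt a n' t) (((t+1:Nat)):Int) [] = [] := by
      rw [PySem.List.pyGetD_natCast, pvLt, PySem.List.getD_map_range _ _ _ _ htn,
        if_neg (by omega)]
    rw [hget]
    rw [Prod.mk.injEq]
    constructor
    · -- layers component
      rw [PySem.List.pySetD_natCast, pvLt, pvSet_map_range _ _ _ _ htn]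
      apply List.map_congr_left
      intro j hj
      by_cases hjt : j = t + 1
      · subst hjt
        rw [if_pos rfl, if_pos le_rfl, List.nil_append, ← pvIter_comm]
      · rw [if_neg hjt]
        by_cases hle : j ≤ t
        · rw [if_pos hle, if_pos (by omega)]
        · rw [if_neg hle, if_neg (by omega)]
    · -- result component
      rw [← pvApp_append, pvIW_comm,
        show (1:Int) + ((t:Nat):Int) = (((t+1:Nat)):Int) by push_cast; ring]

theorem solve_eq (n : Int) (a : List Int) (hn : 1 ≤ n) :
    solve n a =
      PySem.List.pySetD
        (PySem.List.pySetD
          (pvApp (List.replicate (2 ^ n.toNat) 0)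
            (pvIW a 1 (n.toNat - 1) (PySem.List.pyRange 0 ((2:Int) ^ n.toNat) 1)))
          (pvDC a (n.toNat - 1) (PySem.List.pyRange 0 ((2:Int) ^ (n.toNat - 1)) 1)) n)
        (pvDC a (n.toNat - 1)
          (PySem.List.pyRange ((2:Int) ^ (n.toNat - 1)) ((2:Int) ^ n.toNat) 1)) n := by
  obtain ⟨n', rfl⟩ : ∃ n' : Nat, n = (n' : Int) := ⟨n.toNat, by omega⟩
  have hn' : 1 ≤ n' := by omega
  simp only [solve, Int.toNat_natCast]
  have hget0 : PySem.List.pyGetD ((List.range n').map (fun _ => ([]:List Int))) 0 [] = [] := by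
    rw [show (0:Int) = ((0:Nat):Int) from rfl, PySem.List.pyGetD_natCast,
      PySem.List.getD_map_range _ _ _ _ (by omega)]
  rw [pvAppendLoop _ _ (by simp only [List.length_map, List.length_range]; omega), hget0,
    List.nil_append]
  have hlt0 : PySem.List.pySetD ((List.range n').map (fun _ => ([]:List Int))) 0
      (PySem.List.pyRange 0 ((2:Int) ^ n') 1) = pvLt a n' 0 := by
    rw [show (0:Int) = ((0:Nat):Int) from rfl, PySem.List.pySetD_natCast,
      pvSet_map_range _ _ _ _ (by omega), pvLt]
    apply List.map_congr_left
    intro j hj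
    by_cases hj0 : j = 0
    · subst hj0; rw [if_pos rfl, if_pos le_rfl]; rfl
    · rw [if_neg hj0, if_neg (by omega)]
  rw [hlt0]
  have houter := pvOuterLoop a n' (List.replicate (2 ^ n') 0) (n'-1) le_rfl hn'
  rw [show (1 + ((n'-1:Nat):Int)) = ((n':Nat):Int) by omega] at houter
  rw [houter]
  have hlast : PySem.List.pyGetD (pvLt a n' (n'-1)) (-1) [] = pvIter a (n'-1) (pvS0 n') := by
    have hne : pvLt a n' (n'-1) ≠ [] := by
      apply List.ne_nil_of_length_pos
      rw [pvLt, List.length_map, List.length_range]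
      omega
    rw [PySem.List.pyGetD_neg_one _ _ hne]
    rw [List.getLast_eq_getElem]
    simp only [pvLt, List.getElem_map, List.getElem_range, List.length_map, List.length_range]
    rw [if_pos le_rfl]
  rw [hlast]
  have hc1 : ((2:Int))^(n'-1) = ((2^(n'-1) : Nat) : Int) := by push_cast; ring
  have hc0 : ((2:Int))^n' = ((2^n' : Nat) : Int) := by push_cast; ring
  have h2n : (2:Int)^n' = 2^(n'-1) * 2 := by
    rw [← pow_succ]
    congr 1
    omega
  have hle : ((2:Int))^(n'-1) ≤ 2^n' := by
    have hp : (0:Int) < 2^(n'-1) := by positivity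
    rw [h2n]
    linarith
  have hsplit0 : pvS0 n' = PySem.List.pyRange 0 ((2:Int)^(n'-1)) 1
      ++ PySem.List.pyRange ((2:Int)^(n'-1)) ((2:Int)^n') 1 := by
    rw [pvS0]
    exact PySem.List.pyRange_one_append 0 _ _ (by positivity) hle
  have hLlen : (PySem.List.pyRange 0 ((2:Int)^(n'-1)) 1).length = 2^(n'-1) := by
    rw [PySem.List.length_pyRange_one, show ((2:Int)^(n'-1) - 0) = ((2^(n'-1):Nat):Int) by
      rw [hc1]; ring]
    exact Int.toNat_natCast _
  have hRlen : (PySem.List.pyRange ((2:Int)^(n'-1)) ((2:Int)^n') 1).length = 2^(n'-1) := by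
    rw [PySem.List.length_pyRange_one, show ((2:Int)^n' - (2:Int)^(n'-1))
        = ((2^(n'-1):Nat):Int) by rw [h2n, hc1]; ring]
    exact Int.toNat_natCast _
  rw [show pvIter a (n'-1) (pvS0 n')
      = pvIter a (n'-1) (PySem.List.pyRange 0 ((2:Int)^(n'-1)) 1)
        ++ pvIter a (n'-1) (PySem.List.pyRange ((2:Int)^(n'-1)) ((2:Int)^n') 1) by
    rw [hsplit0, pvIter_append a (n'-1) _ _ hLlen hRlen]]
  rw [pvIter_singleton a (n'-1) _ hLlen, pvIter_singleton a (n'-1) _ hRlen]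
  rfl

-- ===== B-side plumbing =====

theorem pvBitLength_two_pow (k : Nat) : PySem.Int.bitLength ((2 ^ k : Nat) : Int) = k + 1 := by
  induction k with
  | zero => decide
  | succ m ih =>
    rw [PySem.Int.bitLength_natCast (by positivity)]
    rw [show 2 ^ (m+1) / 2 = 2 ^ m by rw [pow_succ]; omega, ih]

theorem winnerB_eq (a : List Int) (k : Nat) : ∀ (start : Nat) (res : List Int),
    ((winnerB a start (2 ^ k) res).1 : Int)
        = pvDC a k (PySem.List.pyRange start ((start:Int) + (2:Int) ^ k) 1) ∧
    (winnerB a start (2 ^ k) res).2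
        = pvApp res (pvDW a 1 k (PySem.List.pyRange start ((start:Int) + (2:Int) ^ k) 1)) := by
  induction k with
  | zero =>
    intro start res
    rw [winnerB, if_pos (by norm_num)]
    rw [pow_zero, PySem.List.pyRange_one_singleton]
    exact ⟨rfl, rfl⟩
  | succ k ih =>
    intro start res
    have h2k1 : (2:Nat)^(k+1) = 2^k + 2^k := by rw [pow_succ]; omega
    have h1le : 1 ≤ (2:Nat)^k := Nat.one_le_two_pow
    have hck : ((2:Int))^k = ((2^k : Nat) : Int) := by push_cast; ring
    rw [winnerB, if_neg (by omega)]
    rw [show 2^(k+1)/2 = 2^k by rw [pow_succ]; omega]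
    obtain ⟨ihL1, ihL2⟩ := ih start res
    obtain ⟨ihR1, ihR2⟩ := ih (start + 2^k) ((winnerB a start (2^k) res).2)
    have hbl : (PySem.List.pyRange start ((start:Int) + (2:Int)^k) 1).length = 2^k := by
      rw [PySem.List.length_pyRange_one,
        show ((start:Int) + (2:Int)^k - start) = ((2^k : Nat):Int) by rw [hck]; ring]
      exact Int.toNat_natCast _
    have hsplit : PySem.List.pyRange start ((start:Int) + (2:Int)^(k+1)) 1
        = PySem.List.pyRange start ((start:Int) + (2:Int)^k) 1
          ++ PySem.List.pyRange ((start:Int) + (2:Int)^k)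
              ((start:Int) + (2:Int)^(k+1)) 1 := by
      have hp : (0:Int) < 2^k := by positivity
      have h2 : ((2:Int))^(k+1) = 2^k + 2^k := by rw [pow_succ]; ring
      apply PySem.List.pyRange_one_append
      · linarith
      · linarith [h2.ge]
    have hR : PySem.List.pyRange ((start:Int) + (2:Int)^k)
          ((start:Int) + (2:Int)^(k+1)) 1
        = PySem.List.pyRange ((start + 2^k : Nat)) (((start + 2^k : Nat):Int) + (2:Int)^k)
            1 := by
      have e2 : ((start:Int) + (2:Int)^(k+1)) = (((start + 2^k : Nat)):Int) + (2:Int)^k := by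
        push_cast; rw [pow_succ]; ring
      have e1 : ((start:Int) + (2:Int)^k) = ((start + 2^k : Nat) : Int) := by
        push_cast; ring
      rw [e2, e1]
    have htk : (PySem.List.pyRange start ((start:Int) + (2:Int)^(k+1)) 1).take (2^k)
        = PySem.List.pyRange start ((start:Int) + (2:Int)^k) 1 := by
      rw [hsplit]
      exact List.take_left' hbl
    have hdp : (PySem.List.pyRange start ((start:Int) + (2:Int)^(k+1)) 1).drop (2^k)
        = PySem.List.pyRange ((start:Int) + (2:Int)^k)
            ((start:Int) + (2:Int)^(k+1)) 1 := by
      rw [hsplit]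
      exact List.drop_left' hbl
    have hrnd : (PySem.Int.bitLength (((2:Nat)^(k+1) : Nat) : Int) : Int) - 1
        = 1 + (k : Int) := by
      rw [pvBitLength_two_pow]
      push_cast
      ring
    constructor
    · -- champion component
      simp only [pvDC, htk, hdp, hR, ← ihL1, ← ihR1, pvWins, pvVal]
      split_ifs with hc
      · rfl
      · rfl
    · -- result-list component
      simp only [pvDW, htk, hdp, hR, pvApp_append, ← ihL2, ← ihR2]
      simp only [pvLosr, pvVal, ← ihL1, ← ihR1, hrnd]
      split_ifs with hc
      · rfl
      · rfl

theorem solve_alt_eq (n : Int) (a : List Int) (hn : 1 ≤ n) :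
    solve_alt n a =
      PySem.List.pySetD
        (PySem.List.pySetD
          (pvApp (List.replicate (2 ^ n.toNat) 0)
            (pvDW a 1 (n.toNat - 1) (PySem.List.pyRange 0 ((2:Int) ^ (n.toNat - 1)) 1)
             ++ pvDW a 1 (n.toNat - 1)
                  (PySem.List.pyRange ((2:Int) ^ (n.toNat - 1)) ((2:Int) ^ n.toNat) 1)))
          (pvDC a (n.toNat - 1) (PySem.List.pyRange 0 ((2:Int) ^ (n.toNat - 1)) 1)) n)
        (pvDC a (n.toNat - 1)
          (PySem.List.pyRange ((2:Int) ^ (n.toNat - 1)) ((2:Int) ^ n.toNat) 1)) n := by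
  obtain ⟨n', rfl⟩ : ∃ n' : Nat, n = (n' : Int) := ⟨n.toNat, by omega⟩
  have hn' : 1 ≤ n' := by omega
  have hc1 : ((2:Int))^(n'-1) = ((2^(n'-1) : Nat) : Int) := by push_cast; ring
  have h2n : ((2:Int))^n' = 2^(n'-1) * 2 := by rw [← pow_succ]; congr 1; omega
  simp only [solve_alt, Int.toNat_natCast]
  obtain ⟨hL1, hL2⟩ := winnerB_eq a (n'-1) 0 (List.replicate (2^n') 0)
  obtain ⟨hR1, hR2⟩ := winnerB_eq a (n'-1) (2^(n'-1))
      ((winnerB a 0 (2^(n'-1)) (List.replicate (2^n') 0)).2)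
  simp only [Nat.cast_zero, zero_add] at hL1 hL2
  rw [show (((2^(n'-1):Nat)):Int) = (2:Int)^(n'-1) from hc1.symm] at hR1 hR2
  rw [show ((2:Int)^(n'-1) + (2:Int)^(n'-1)) = (2:Int)^n' by rw [h2n]; ring] at hR1 hR2
  rw [hR2, hR1, hL1, hL2, ← pvApp_append]

-- ===== VERDICT (by name: the statement is the Claim_ definition above) =====
theorem solve_spec : Claim_equal_solve := by
  intro n a _ hpre
  unfold Spec_solve
  obtain ⟨hn, -⟩ := hpre
  have hn' : 1 ≤ n.toNat := by omega
  set n' := n.toNat with hn'def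
  have hc1 : ((2:Int))^(n'-1) = ((2^(n'-1) : Nat) : Int) := by push_cast; ring
  have h2n : ((2:Int))^n' = 2^(n'-1) * 2 := by rw [← pow_succ]; congr 1; omega
  have hle : ((2:Int))^(n'-1) ≤ 2^n' := by
    have hp : (0:Int) < 2^(n'-1) := by positivity
    rw [h2n]
    linarith
  set L := PySem.List.pyRange 0 ((2:Int)^(n'-1)) 1 with hLdef
  set R := PySem.List.pyRange ((2:Int)^(n'-1)) ((2:Int)^n') 1 with hRdef
  have hsplit0 : PySem.List.pyRange 0 ((2:Int)^n') 1 = L ++ R :=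
    PySem.List.pyRange_one_append 0 _ _ (by positivity) hle
  have hLlen : L.length = 2^(n'-1) := by
    rw [hLdef, PySem.List.length_pyRange_one,
      show ((2:Int)^(n'-1) - 0) = ((2^(n'-1):Nat):Int) by rw [hc1]; ring]
    exact Int.toNat_natCast _
  have hRlen : R.length = 2^(n'-1) := by
    rw [hRdef, PySem.List.length_pyRange_one,
      show ((2:Int)^n' - (2:Int)^(n'-1)) = ((2^(n'-1):Nat):Int) by rw [h2n, hc1]; ring]
    exact Int.toNat_natCast _
  -- the two write lists are permutations of each other
  have hP : (pvIW a 1 (n'-1) (PySem.List.pyRange 0 ((2:Int)^n') 1)).Perm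
      (pvDW a 1 (n'-1) L ++ pvDW a 1 (n'-1) R) := by
    rw [hsplit0]
    exact (pvIW_append a (n'-1) 1 L R hLlen hRlen).trans
      ((pvIW_perm_pvDW a (n'-1) 1 L hLlen).append (pvIW_perm_pvDW a (n'-1) 1 R hRlen))
  -- the written positions are pairwise distinct and nonnegative
  have hPsplit : (pvIW a 1 (n'-1) (PySem.List.pyRange 0 ((2:Int)^n') 1)).Perm
      (pvIW a 1 (n'-1) L ++ pvIW a 1 (n'-1) R) := by
    rw [hsplit0]
    exact pvIW_append a (n'-1) 1 L R hLlen hRlen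
  have hkeyL := pvIW_keys a (n'-1) 1 L hLlen
  have hkeyR := pvIW_keys a (n'-1) 1 R hRlen
  have hmemL : ∀ x ∈ (pvIW a 1 (n'-1) L).map Prod.fst, x ∈ L := by
    intro x hx
    exact hkeyL.mem_iff.mp (List.mem_append.mpr (Or.inr hx))
  have hmemR : ∀ x ∈ (pvIW a 1 (n'-1) R).map Prod.fst, x ∈ R := by
    intro x hx
    exact hkeyR.mem_iff.mp (List.mem_append.mpr (Or.inr hx))
  have hndL : ((pvIW a 1 (n'-1) L).map Prod.fst).Nodup :=
    (hkeyL.nodup_iff.mpr (PySem.List.nodup_pyRange_one _ _)).of_append_right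
  have hndR : ((pvIW a 1 (n'-1) R).map Prod.fst).Nodup :=
    (hkeyR.nodup_iff.mpr (PySem.List.nodup_pyRange_one _ _)).of_append_right
  have hdisj : List.Disjoint ((pvIW a 1 (n'-1) L).map Prod.fst)
      ((pvIW a 1 (n'-1) R).map Prod.fst) := by
    intro x hxL hxR
    have h1 := PySem.List.mem_pyRange_one.mp (hmemL x hxL)
    have h2 := PySem.List.mem_pyRange_one.mp (hmemR x hxR)
    have hp : (0:Int) < 2^(n'-1) := by positivity
    linarith [h1.2, h2.1]
  have hnd1 : ((pvIW a 1 (n'-1) (PySem.List.pyRange 0 ((2:Int)^n') 1)).map Prod.fst).Nodup := by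
    apply ((hPsplit.map Prod.fst).nodup_iff).mpr
    rw [List.map_append]
    exact hndL.append hndR hdisj
  have hpos1 : ∀ p ∈ pvIW a 1 (n'-1) (PySem.List.pyRange 0 ((2:Int)^n') 1), 0 ≤ p.1 := by
    intro p hp
    have hp2 := hPsplit.mem_iff.mp hp
    have hp0 : (0:Int) < 2^(n'-1) := by positivity
    rcases List.mem_append.mp hp2 with hmem | hmem
    · exact (PySem.List.mem_pyRange_one.mp
        (hmemL p.1 (List.mem_map_of_mem hmem))).1
    · have := (PySem.List.mem_pyRange_one.mp (hmemR p.1 (List.mem_map_of_mem hmem))).1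
      linarith
  rw [solve_eq n a hn, solve_alt_eq n a hn,
    pvApp_perm _ _ hP hnd1 hpos1 (List.replicate (2^n') 0)]
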